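-- pv_equiv track=rewrite | github.com/Vladislav-76/test_sequence | sequence.py | num_generate
-- ===== SOURCE A (Python) =====
-- def num_generate(n):
--     count = 0
--     digit = 1
--     while n > 0:
--         if count < digit:
--             yield digit
--             n -= 1
--             count += 1
--         else:
--             count = 0
--             digit += 1
-- ===== SOURCE B (Python) =====
-- def num_generate(n):
--     if n <= 0:
--         return
--     # Stage 1: find the number of complete runs needed so the triangle covers n terms.
--     runs = 0
--     total = 0
--     while total < n:
--         runs += 1
--         total += runs
--     # Stage 2: materialize the whole triangle of complete runs, then truncate to n terms.
--     triangle = []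
--     for d in range(1, runs + 1):
--         triangle += [d] * d
--     yield from triangle[:n]
-- ===== Notes on version B (the rewrite author's own statement) =====
-- stated objective: alternative
-- what changed: Instead of A's online state machine that tracks a per-run counter while emitting one term at a time, B first computes arithmetically how many complete runs cover n terms, materializes the full triangle with list multiplication, and truncates it with a slice.
import Mathlib
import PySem

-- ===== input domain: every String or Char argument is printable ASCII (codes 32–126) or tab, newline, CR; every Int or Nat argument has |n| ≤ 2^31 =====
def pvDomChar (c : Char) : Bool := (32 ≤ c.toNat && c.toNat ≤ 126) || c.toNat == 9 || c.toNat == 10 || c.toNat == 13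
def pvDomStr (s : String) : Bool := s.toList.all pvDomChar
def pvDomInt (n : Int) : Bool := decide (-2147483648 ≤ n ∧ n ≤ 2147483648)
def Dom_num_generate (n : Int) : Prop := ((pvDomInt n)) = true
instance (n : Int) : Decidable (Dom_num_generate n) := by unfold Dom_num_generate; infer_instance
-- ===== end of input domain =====

-- B computes the number of complete runs first, builds the whole triangle, and slices it to n,
-- instead of A's per-element state machine; objective: alternative (staged construction).
-- Both ports return the list of values the Python generator yields (the generator is consumed fully).

-- ===== PORT A =====
-- while n > 0: if count < digit: yield digit; n -= 1; count += 1 else: count = 0; digit += 1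
def numGenLoopA (n count digit : Int) : List Int :=
  if _hn : n > 0 then
    if _hc : count < digit then
      digit :: numGenLoopA (n - 1) (count + 1) digit
    else
      numGenLoopA n 0 (digit + 1)
  else []
termination_by (n.toNat, if count < digit then 0 else 1 + (-digit).toNat)
decreasing_by
  · apply Prod.Lex.left; omega
  · apply Prod.Lex.right'
    · omega
    · split <;> omega

def num_generate (n : Int) : List Int := numGenLoopA n 0 1

-- ===== PORT B =====
-- Stage 1: runs = 0; total = 0; while total < n: runs += 1; total += runs
-- fuel = n.toNat bounds the iterations (each adds runs+1 ≥ 1 to total, which starts at 0);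
-- when fuel runs out total ≥ n already, so fuel is never the reason the loop stops.
def findRunsB (n : Int) : Nat → Int → Int → Int × Int
  | 0, total, runs => (runs, total)
  | fuel + 1, total, runs =>
    if total < n then findRunsB n fuel (total + (runs + 1)) (runs + 1)
    else (runs, total)

-- Stage 2: triangle = []; for d in range(1, runs+1): triangle += [d] * d; yield from triangle[:n]
-- triangle[:n] is ported as List.take n.toNat, exact here since this branch has 0 < n.
def num_generate_alt (n : Int) : List Int :=
  if n ≤ 0 then []
  else
    match findRunsB n n.toNat 0 0 with
    | (runs, _total) =>
      ((PySem.List.pyRange 1 (runs + 1) 1).foldl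
        (fun acc d => acc ++ List.replicate d.toNat d) []).take n.toNat

-- ===== PRECONDITION & SPEC =====
def Spec_num_generate (n : Int) (out : List Int) : Prop := out = num_generate_alt n
instance (n : Int) (out : List Int) : Decidable (Spec_num_generate n out) := by unfold Spec_num_generate; infer_instance

-- ===== CLAIM (what is proved, stated in full; the proofs are below) =====
def Claim_equal_num_generate : Prop := ∀ (n : Int), Dom_num_generate n → Spec_num_generate n (num_generate n)

-- ===== LEMMAS AND PROOFS =====

-- the triangle built from k consecutive runs starting at digit
def seqRuns : Nat → Int → List Int
  | 0, _ => []
  | k + 1, digit => List.replicate digit.toNat digit ++ seqRuns k (digit + 1)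

lemma numGenLoopA_nonpos (n count digit : Int) (h : n ≤ 0) :
    numGenLoopA n count digit = [] := by
  rw [numGenLoopA]; simp [not_lt.mpr h]

-- one full (possibly partial, if n runs out) run of A's state machine
lemma numGenLoopA_run (k : Nat) :
    ∀ (n count digit : Int), count + k = digit →
      numGenLoopA n count digit =
        List.replicate (min (k : Int) n).toNat digit ++
          numGenLoopA (n - min (k : Int) n) 0 (digit + 1) := by
  induction k with
  | zero =>
    intro n count digit hk
    simp only [Nat.cast_zero]
    by_cases hn : n > 0
    · have hmin : min (0 : Int) n = 0 := by omega
      rw [numGenLoopA]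
      have hc : ¬ count < digit := by omega
      simp [hn, hc, hmin]
    · have hmin : min (0 : Int) n = n := by omega
      rw [numGenLoopA_nonpos n count digit (by omega), hmin, sub_self,
          numGenLoopA_nonpos 0 0 (digit + 1) le_rfl]
      have ht : n.toNat = 0 := by omega
      simp [ht]
  | succ k ih =>
    intro n count digit hk
    by_cases hn : n > 0
    · have hc : count < digit := by push_cast at hk; omega
      rw [numGenLoopA]
      simp only [hn, hc, dif_pos]
      rw [ih (n - 1) (count + 1) digit (by push_cast at hk ⊢; omega)]
      have h1 : (min ((k + 1 : Nat) : Int) n).toNat = (min ((k : Nat) : Int) (n - 1)).toNat + 1 := by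
        push_cast; omega
      have h2 : n - min ((k + 1 : Nat) : Int) n = (n - 1) - min ((k : Nat) : Int) (n - 1) := by
        push_cast; omega
      rw [h1, h2, List.replicate_succ]
      simp
    · have hmin : min ((k + 1 : Nat) : Int) n = n := by push_cast; omega
      rw [numGenLoopA_nonpos n count digit (by omega), hmin, sub_self,
          numGenLoopA_nonpos 0 0 (digit + 1) le_rfl]
      have ht : n.toNat = 0 := by omega
      simp [ht]

-- A's loop is the truncated triangle, whenever the triangle of k runs is long enough
lemma numGenLoopA_eq_take (k : Nat) :
    ∀ (n digit : Int), 1 ≤ digit → n.toNat ≤ (seqRuns k digit).length →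
      numGenLoopA n 0 digit = (seqRuns k digit).take n.toNat := by
  induction k with
  | zero =>
    intro n digit _ hlen
    simp only [seqRuns, List.length_nil, Nat.le_zero] at hlen
    rw [numGenLoopA_nonpos n 0 digit (by omega)]
    simp [seqRuns]
  | succ k ih =>
    intro n digit hd hlen
    by_cases hn : n > 0
    · have hk : (0 : Int) + (digit.toNat : Int) = digit := by omega
      rw [numGenLoopA_run digit.toNat n 0 digit hk]
      have hcast : ((digit.toNat : Nat) : Int) = digit := by omega
      rw [hcast]
      simp only [seqRuns, List.length_append, List.length_replicate] at hlen
      rw [seqRuns, List.take_append]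
      by_cases hle : n ≤ digit
      · have hmin : min digit n = n := by omega
        rw [hmin, numGenLoopA_nonpos _ 0 _ (by omega : n - n ≤ 0)]
        have h1 : n.toNat - digit.toNat = 0 := by omega
        have h2 : n.toNat ⊓ digit.toNat = n.toNat := by omega
        simp [h1, h2, List.take_replicate]
      · have hmin : min digit n = digit := by omega
        rw [hmin, ih (n - digit) (digit + 1) (by omega) (by omega)]
        have h2 : n.toNat ⊓ digit.toNat = digit.toNat := by omega
        have h3 : n.toNat - digit.toNat = (n - digit).toNat := by omega
        simp [h2, h3, List.take_replicate]
    · rw [numGenLoopA_nonpos n 0 digit (by omega)]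
      have ht : n.toNat = 0 := by omega
      simp [ht]

-- appending the next run at the back
lemma seqRuns_snoc (k : Nat) :
    ∀ (digit : Int), seqRuns (k + 1) digit =
      seqRuns k digit ++ List.replicate (digit + k).toNat (digit + k) := by
  induction k with
  | zero => intro digit; simp [seqRuns]
  | succ k ih =>
    intro digit
    rw [seqRuns, ih (digit + 1), seqRuns]
    have : digit + 1 + (k : Int) = digit + ((k : Nat) + 1 : Nat) := by push_cast; ring
    simp [this, List.append_assoc]

lemma length_seqRuns_snoc (k : Nat) (digit : Int) :
    (seqRuns (k + 1) digit).length = (seqRuns k digit).length + (digit + k).toNat := by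
  rw [seqRuns_snoc]; simp

-- B's foldl over range(1, runs+1) builds the same triangle
lemma foldl_eq_seqRuns (k : Nat) :
    ∀ (digit : Int) (acc : List Int), 1 ≤ digit →
      (PySem.List.pyRange digit (digit + k) 1).foldl
        (fun acc d => acc ++ List.replicate d.toNat d) acc = acc ++ seqRuns k digit := by
  induction k with
  | zero =>
    intro digit acc _
    rw [PySem.List.pyRange_one_eq_nil (by omega)]
    simp [seqRuns]
  | succ k ih =>
    intro digit acc hd
    rw [PySem.List.pyRange_one_cons (by push_cast; omega)]
    have harg : digit + ((k : Nat) + 1 : Nat) = (digit + 1) + (k : Int) := by push_cast; ring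
    simp only [List.foldl_cons, harg]
    rw [ih (digit + 1) _ (by omega), seqRuns, List.append_assoc]

-- findRunsB invariants: result runs ≥ 0, total = triangle length, and (with enough fuel) total ≥ n
lemma findRunsB_spec (n : Int) (fuel : Nat) :
    ∀ (total runs : Int), 0 ≤ runs → total = ((seqRuns runs.toNat 1).length : Int) →
      n ≤ total + fuel →
      0 ≤ (findRunsB n fuel total runs).1 ∧
      (findRunsB n fuel total runs).2 =
        ((seqRuns (findRunsB n fuel total runs).1.toNat 1).length : Int) ∧
      n ≤ (findRunsB n fuel total runs).2 := by
  induction fuel with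
  | zero =>
    intro total runs hr htot hfuel
    exact ⟨hr, htot, by simpa using hfuel⟩
  | succ fuel ih =>
    intro total runs hr htot hfuel
    rw [findRunsB]
    by_cases hlt : total < n
    · simp only [if_pos hlt]
      apply ih
      · omega
      · have hsucc : (runs + 1).toNat = runs.toNat + 1 := by omega
        rw [hsucc, length_seqRuns_snoc]
        have : ((1 : Int) + (runs.toNat : Int)).toNat = runs.toNat + 1 := by omega
        rw [this]
        push_cast; omega
      · push_cast at hfuel ⊢; omega
    · simp only [if_neg hlt]
      exact ⟨hr, htot, by omega⟩

-- ===== VERDICT (by name: the statement is the Claim_ definition above) =====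
theorem num_generate_spec : Claim_equal_num_generate := by
  intro n _
  unfold Spec_num_generate num_generate num_generate_alt
  by_cases hn : n ≤ 0
  · rw [if_pos hn, numGenLoopA_nonpos n 0 1 hn]
  · rw [if_neg hn]
    obtain ⟨runs, total, heq⟩ : ∃ r t, findRunsB n n.toNat 0 0 = (r, t) :=
      ⟨_, _, rfl⟩
    have hspec := findRunsB_spec n n.toNat 0 0 le_rfl (by simp [seqRuns]) (by omega)
    rw [heq] at hspec ⊢
    dsimp only at hspec ⊢
    obtain ⟨hr, htot, hge⟩ := hspec
    have hrange : (1 : Int) + (runs.toNat : Int) = runs + 1 := by omega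
    rw [show PySem.List.pyRange 1 (runs + 1) 1 =
          PySem.List.pyRange 1 (1 + (runs.toNat : Int)) 1 by rw [hrange]]
    rw [foldl_eq_seqRuns runs.toNat 1 [] le_rfl, List.nil_append]
    exact numGenLoopA_eq_take runs.toNat n 1 le_rfl (by omega)
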